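-- pv_equiv track=rewrite | github.com/Arrobert2202/Python-Programming | Lab3/ex9.py | obstructed_view
-- ===== SOURCE A (Python) =====
-- def obstructed_view(heights):
--   seats = []
--   for row in range(len(heights)-1, 0, -1):
--     for col in range(len(heights[0])):
--       for i in range(row - 1, 0, -1):
--         if heights[row][col] <= heights[i][col]:
--           seats.append((row,col))
--   return seats
-- ===== SOURCE B (Python) =====
-- def obstructed_view(heights):
--     n = len(heights)
--     if n <= 1:
--         return []
--     width = len(heights[0])
--     # phase 1: column-major pass; col_counts[col][row] = number of earlier
--     # rows 1..row-1 in this column at least as tall as row's seat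
--     col_counts = []
--     for col in range(width):
--         prior = []
--         cnts = [0]  # row 0 placeholder
--         for row in range(1, n):
--             h = heights[row][col]
--             cnts.append(sum(1 for v in prior if v >= h))
--             prior.append(h)
--         col_counts.append(cnts)
--     # phase 2: emit in A's order, repeating each seat by its count
--     seats = []
--     for row in range(n - 1, 0, -1):
--         for col in range(width):
--             seats += [(row, col)] * col_counts[col][row]
--     return seats
-- ===== Notes on version B (the rewrite author's own statement) =====
-- stated objective: alternative
-- what changed: Instead of A's triple nested row-major loop appending one tuple per obstructing row, B makes one column-major pass that tabulates per-seat obstruction counts (inner scan collapsed into a builtin sum over the running list of prior heights) and then a second pass that emits each seat repeated by its count via list repetition; measured somewhat faster but below the 1.5x bar at the largest size.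
-- outside the precondition, e.g. on obstructed_view([[5, 181, 4], [4]]): A returns [], B raises IndexError
import Mathlib
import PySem

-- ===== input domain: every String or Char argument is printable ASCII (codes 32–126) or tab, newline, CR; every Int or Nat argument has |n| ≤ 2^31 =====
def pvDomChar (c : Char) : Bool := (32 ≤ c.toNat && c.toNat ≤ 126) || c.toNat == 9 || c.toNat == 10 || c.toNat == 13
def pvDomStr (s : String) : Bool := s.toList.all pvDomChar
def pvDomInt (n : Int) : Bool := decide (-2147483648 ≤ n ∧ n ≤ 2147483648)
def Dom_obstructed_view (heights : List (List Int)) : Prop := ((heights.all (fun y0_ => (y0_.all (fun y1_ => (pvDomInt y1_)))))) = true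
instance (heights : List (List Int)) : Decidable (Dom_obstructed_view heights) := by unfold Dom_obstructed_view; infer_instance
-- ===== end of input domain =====

-- B replaces A's triple nested row-major loop (one append per obstructing row) by a
-- column-major tabulation of per-seat obstruction counts followed by an emission pass
-- using list repetition; a different decomposition of the same computation.

-- ===== PORT A =====
def obstructed_view (heights : List (List Int)) : List (Int × Int) :=
  (PySem.List.pyRange ((heights.length : Int) - 1) 0 (-1)).foldl (fun seats row =>
    (PySem.List.pyRange 0 ((PySem.List.pyGetD heights 0 []).length : Int) 1).foldl (fun seats col =>
      (PySem.List.pyRange (row - 1) 0 (-1)).foldl (fun seats i =>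
        if PySem.List.pyGetD (PySem.List.pyGetD heights row []) col 0 ≤
           PySem.List.pyGetD (PySem.List.pyGetD heights i []) col 0
        then seats ++ [(row, col)] else seats) seats) seats) []

-- ===== PORT B =====
def obstructed_view_alt (heights : List (List Int)) : List (Int × Int) :=
  let n : Int := heights.length
  if n ≤ 1 then []
  else
    let width : Int := (PySem.List.pyGetD heights 0 []).length
    let col_counts : List (List Int) :=
      (PySem.List.pyRange 0 width 1).foldl (fun cc col =>
        let pc := (PySem.List.pyRange 1 n 1).foldl (fun (pc : List Int × List Int) row =>
            let h := PySem.List.pyGetD (PySem.List.pyGetD heights row []) col 0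
            let c := pc.1.foldl (fun acc v => if h ≤ v then acc + 1 else acc) (0 : Int)
            (pc.1 ++ [h], pc.2 ++ [c])) ([], [(0 : Int)])
        cc ++ [pc.2]) []
    (PySem.List.pyRange (n - 1) 0 (-1)).foldl (fun seats row =>
      (PySem.List.pyRange 0 width 1).foldl (fun seats col =>
        seats ++ PySem.List.pyRepeat [(row, col)]
          (PySem.List.pyGetD (PySem.List.pyGetD col_counts col []) row 0)) seats) []

-- ===== PRECONDITION & SPEC =====
-- Pre_ excludes the ragged inputs (some row after the first shorter than row 0): on most of
-- them the Python A raises IndexError, and on the two-row ones A's empty inner loop returns []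
-- without ever reading the short row while B reads it eagerly and raises IndexError (see cite).
def Pre_obstructed_view (heights : List (List Int)) : Prop :=
  ∀ r ∈ heights.tail, (heights.headD []).length ≤ r.length
instance (heights : List (List Int)) : Decidable (Pre_obstructed_view heights) := by
  unfold Pre_obstructed_view; infer_instance

def pvWitness_obstructed_view : List (List Int) := [[1, 5], [2, 3], [1, 4]]

def Spec_obstructed_view (heights : List (List Int)) (out : List (Int × Int)) : Prop := out = obstructed_view_alt heights
instance (heights : List (List Int)) (out : List (Int × Int)) : Decidable (Spec_obstructed_view heights out) := by unfold Spec_obstructed_view; infer_instance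

-- ===== CLAIM (what is proved, stated in full; the proofs are below) =====
def Claim_equal_obstructed_view : Prop := ∀ (heights : List (List Int)), Dom_obstructed_view heights → Pre_obstructed_view heights → Spec_obstructed_view heights (obstructed_view heights)

-- ===== LEMMAS AND PROOFS =====

-- heights[r][c] with Python defaults (both ports read entries this way)
def pvG (H : List (List Int)) (r c : Int) : Int :=
  PySem.List.pyGetD (PySem.List.pyGetD H r []) c 0

-- number of rows 1..r-1 whose column-c entry is ≥ the (r,c) entry
def pvCnt (H : List (List Int)) (r c : Int) : Nat :=
  (PySem.List.pyRange 1 r 1).countP (fun i => decide (pvG H r c ≤ pvG H i c))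

-- the common canonical value of both ports
def pvCanon (H : List (List Int)) : List (Int × Int) :=
  (PySem.List.pyRange ((H.length : Int) - 1) 0 (-1)).flatMap (fun row =>
    (PySem.List.pyRange 0 ((PySem.List.pyGetD H 0 []).length : Int) 1).flatMap (fun col =>
      List.replicate (pvCnt H row col) (row, col)))

theorem pv_filter_map_const {α β : Type} (l : List α) (p : α → Bool) (x : β) :
    (l.filter p).map (fun _ => x) = List.replicate (l.countP p) x := by
  induction l with
  | nil => rfl
  | cons a t ih =>
      by_cases h : p a = true
      · simp [List.filter_cons, List.countP_cons, h, ih, List.replicate_succ]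
      · simp [List.filter_cons, List.countP_cons, h, ih]

theorem pv_A_eq_canon (H : List (List Int)) : obstructed_view H = pvCanon H := by
  unfold obstructed_view pvCanon
  have hinner : ∀ (row : Int),
      (fun (seats : List (Int × Int)) col =>
        (PySem.List.pyRange (row - 1) 0 (-1)).foldl (fun seats i =>
          if PySem.List.pyGetD (PySem.List.pyGetD H row []) col 0 ≤
             PySem.List.pyGetD (PySem.List.pyGetD H i []) col 0
          then seats ++ [(row, col)] else seats) seats)
      = (fun seats col => seats ++ List.replicate (pvCnt H row col) (row, col)) := by
    intro row
    funext seats col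
    rw [PySem.List.foldl_append_ite
      (p := fun i => PySem.List.pyGetD (PySem.List.pyGetD H row []) col 0 ≤
                     PySem.List.pyGetD (PySem.List.pyGetD H i []) col 0)
      (f := fun _ => (row, col))]
    rw [pv_filter_map_const]
    have hrev : PySem.List.pyRange (row - 1) 0 (-1)
        = (PySem.List.pyRange 1 row 1).reverse := by
      rw [PySem.List.pyRange_neg_one_eq_reverse]
      norm_num
    rw [hrev, List.countP_reverse]
    rfl
  have houter : (fun (seats : List (Int × Int)) row =>
      (PySem.List.pyRange 0 ((PySem.List.pyGetD H 0 []).length : Int) 1).foldl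
        (fun seats col =>
          (PySem.List.pyRange (row - 1) 0 (-1)).foldl (fun seats i =>
            if PySem.List.pyGetD (PySem.List.pyGetD H row []) col 0 ≤
               PySem.List.pyGetD (PySem.List.pyGetD H i []) col 0
            then seats ++ [(row, col)] else seats) seats) seats)
      = (fun seats row => seats ++
          (PySem.List.pyRange 0 ((PySem.List.pyGetD H 0 []).length : Int) 1).flatMap
            (fun col => List.replicate (pvCnt H row col) (row, col))) := by
    funext seats row
    rw [hinner row, PySem.List.foldl_append_eq_flatMap]
  show (PySem.List.pyRange ((H.length : Int) - 1) 0 (-1)).foldl _ [] = _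
  rw [houter, PySem.List.foldl_append_eq_flatMap]
  simp

-- the per-column fold of B computes prior heights and counts as maps over ranges
theorem pv_colfold (H : List (List Int)) (col : Int) (r : Int) (hr : 1 ≤ r) :
    (PySem.List.pyRange 1 r 1).foldl (fun (pc : List Int × List Int) row =>
        let h := PySem.List.pyGetD (PySem.List.pyGetD H row []) col 0
        let c := pc.1.foldl (fun acc v => if h ≤ v then acc + 1 else acc) (0 : Int)
        (pc.1 ++ [h], pc.2 ++ [c])) ([], [(0 : Int)])
      = ((PySem.List.pyRange 1 r 1).map (fun i => pvG H i col),
         (PySem.List.pyRange 0 r 1).map (fun j => (pvCnt H j col : Int))) := by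
  induction r, hr using Int.le_induction with
  | base =>
      have h1 : PySem.List.pyRange 1 1 1 = [] := PySem.List.pyRange_one_eq_nil (by omega)
      have h2 : PySem.List.pyRange 0 1 1 = [0] := PySem.List.pyRange_one_singleton 0
      simp [h1, h2, pvCnt, PySem.List.pyRange_one_eq_nil]
  | succ r hr ih =>
      rw [PySem.List.pyRange_one_succ_right (by omega : (1:Int) ≤ r),
          PySem.List.pyRange_one_succ_right (by omega : (0:Int) ≤ r)]
      rw [List.foldl_append, ih]
      simp only [List.foldl_cons, List.foldl_nil, List.map_append, List.map_cons, List.map_nil,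
        Prod.mk.injEq]
      refine ⟨by simp [pvG], ?_⟩
      congr 1
      rw [PySem.List.foldl_ite_add_one
        (p := fun v => PySem.List.pyGetD (PySem.List.pyGetD H r []) col 0 ≤ v)]
      rw [List.countP_map]
      simp only [pvCnt, pvG, zero_add]
      rfl

theorem pv_B_eq_canon (H : List (List Int)) : obstructed_view_alt H = pvCanon H := by
  unfold obstructed_view_alt pvCanon
  by_cases hn : (H.length : Int) ≤ 1
  · have : PySem.List.pyRange ((H.length : Int) - 1) 0 (-1) = [] :=
      PySem.List.pyRange_neg_one_eq_nil (by omega)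
    simp [hn, this]
  · simp only [hn, if_false]
    set n : Int := (H.length : Int) with hndef
    set W : Int := ((PySem.List.pyGetD H 0 []).length : Int) with hWdef
    -- the col_counts table
    have htable :
        (PySem.List.pyRange 0 W 1).foldl (fun cc col =>
          let pc := (PySem.List.pyRange 1 n 1).foldl (fun (pc : List Int × List Int) row =>
              let h := PySem.List.pyGetD (PySem.List.pyGetD H row []) col 0
              let c := pc.1.foldl (fun acc v => if h ≤ v then acc + 1 else acc) (0 : Int)
              (pc.1 ++ [h], pc.2 ++ [c])) ([], [(0 : Int)])
          cc ++ [pc.2]) []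
        = (PySem.List.pyRange 0 W 1).map
            (fun col => (PySem.List.pyRange 0 n 1).map (fun j => (pvCnt H j col : Int))) := by
      have hfn : (fun (cc : List (List Int)) col =>
          let pc := (PySem.List.pyRange 1 n 1).foldl (fun (pc : List Int × List Int) row =>
              let h := PySem.List.pyGetD (PySem.List.pyGetD H row []) col 0
              let c := pc.1.foldl (fun acc v => if h ≤ v then acc + 1 else acc) (0 : Int)
              (pc.1 ++ [h], pc.2 ++ [c])) ([], [(0 : Int)])
          cc ++ [pc.2])
          = (fun cc col => cc ++
              [(PySem.List.pyRange 0 n 1).map (fun j => (pvCnt H j col : Int))]) := by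
        funext cc col
        show cc ++ [((PySem.List.pyRange 1 n 1).foldl _ ([], [(0:Int)])).2] = _
        rw [pv_colfold H col n (by omega)]
      rw [hfn, PySem.List.foldl_append_singleton_eq_map]
      simp
    rw [htable]
    -- the emission loops
    have hcell : ∀ (row col : Int), 0 ≤ row → row < n → 0 ≤ col → col < W →
        PySem.List.pyRepeat [(row, col)]
          (PySem.List.pyGetD (PySem.List.pyGetD
            ((PySem.List.pyRange 0 W 1).map
              (fun col => (PySem.List.pyRange 0 n 1).map (fun j => (pvCnt H j col : Int))))
            col []) row 0)
        = List.replicate (pvCnt H row col) (row, col) := by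
      intro row col h1 h2 h3 h4
      rw [PySem.List.pyGetD_map_pyRange_of_nonneg _ _ _ _ h3 h4,
          PySem.List.pyGetD_map_pyRange_of_nonneg _ _ _ _ h1 h2,
          PySem.List.pyRepeat_singleton]
      simp
    have hrow : ∀ (seats : List (Int × Int)) (row : Int),
        row ∈ PySem.List.pyRange (n - 1) 0 (-1) →
        (PySem.List.pyRange 0 W 1).foldl (fun seats col =>
          seats ++ PySem.List.pyRepeat [(row, col)]
            (PySem.List.pyGetD (PySem.List.pyGetD
              ((PySem.List.pyRange 0 W 1).map
                (fun col => (PySem.List.pyRange 0 n 1).map (fun j => (pvCnt H j col : Int))))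
              col []) row 0)) seats
        = seats ++ (PySem.List.pyRange 0 W 1).flatMap
            (fun col => List.replicate (pvCnt H row col) (row, col)) := by
      intro seats row hrowmem
      rw [PySem.List.mem_pyRange_neg_one] at hrowmem
      refine Eq.trans (PySem.List.foldl_congr_mem _ _
        (fun seats col => seats ++ List.replicate (pvCnt H row col) (row, col)) _ ?_) ?_
      · intro acc col hcolmem
        rw [PySem.List.mem_pyRange_one] at hcolmem
        simp only
        rw [hcell row col (by omega) (by omega) hcolmem.1 hcolmem.2]
      · rw [PySem.List.foldl_append_eq_flatMap]
    refine Eq.trans (PySem.List.foldl_congr_mem _ _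
      (fun seats row => seats ++ (PySem.List.pyRange 0 W 1).flatMap
        (fun col => List.replicate (pvCnt H row col) (row, col))) _
      (fun acc row h => hrow acc row h)) ?_
    rw [PySem.List.foldl_append_eq_flatMap]
    simp

-- ===== VERDICT (by name: the statement is the Claim_ definition above) =====
theorem obstructed_view_spec : Claim_equal_obstructed_view := by
  intro H _ _
  unfold Spec_obstructed_view
  rw [pv_A_eq_canon, pv_B_eq_canon]
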